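-- pv_equiv track=rewrite | github.com/Vinod3d/dsa-in-python | 01_Flowchart_and_Pseudocode/pattern/7_rightCon_pyramid.py | RightConPyramid
-- ===== SOURCE A (Python) =====
-- def RightConPyramid(n):
--     pattern = []
--     for i in range(1, 2*n):
--         if i <= n:
--             line = "* " * i
--         else:
--             line = "* " * (2*n - i)
--         pattern.append(line)
--     return pattern
-- ===== SOURCE B (Python) =====
-- def RightConPyramid(n):
--     first = ["* " * i for i in range(1, n + 1)]
--     return first + list(reversed(first[:-1]))
-- ===== Notes on version B (the rewrite author's own statement) =====
-- stated objective: simpler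
-- what changed: Builds only the ascending half with a comprehension and mirrors it (first + reversed(first[:-1])), removing A's per-line i<=n conditional over the full 2n-1 range.
import Mathlib
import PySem

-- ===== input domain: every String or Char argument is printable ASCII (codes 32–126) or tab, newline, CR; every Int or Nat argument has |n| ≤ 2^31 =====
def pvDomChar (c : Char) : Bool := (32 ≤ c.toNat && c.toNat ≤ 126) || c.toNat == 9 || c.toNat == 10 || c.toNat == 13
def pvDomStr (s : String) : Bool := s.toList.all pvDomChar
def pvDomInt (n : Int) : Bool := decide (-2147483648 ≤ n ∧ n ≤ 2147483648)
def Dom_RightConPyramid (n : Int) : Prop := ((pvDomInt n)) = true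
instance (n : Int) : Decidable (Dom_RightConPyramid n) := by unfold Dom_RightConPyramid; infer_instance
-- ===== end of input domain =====

-- B builds only the ascending half and mirrors it, removing A's per-line conditional (objective: simpler).

-- shared primitive: the Python string repetition "* " * i
def starLine (i : Int) : String := String.ofList (PySem.List.pyRepeat "* ".toList i)

-- ===== PORT A =====
def RightConPyramid (n : Int) : List String :=
  (PySem.List.pyRange 1 (2*n) 1).foldl
    (fun pattern i => pattern ++ [if i ≤ n then starLine i else starLine (2*n - i)]) []

-- ===== PORT B =====
def RightConPyramid_alt (n : Int) : List String :=
  let first := (PySem.List.pyRange 1 (n+1) 1).map starLine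
  first ++ (PySem.List.slice first none (some (-1))).reverse

-- ===== PRECONDITION & SPEC =====
def Spec_RightConPyramid (n : Int) (out : List String) : Prop := out = RightConPyramid_alt n
instance (n : Int) (out : List String) : Decidable (Spec_RightConPyramid n out) := by unfold Spec_RightConPyramid; infer_instance

-- ===== CLAIM (what is proved, stated in full; the proofs are below) =====
def Claim_equal_RightConPyramid : Prop := ∀ (n : Int), Dom_RightConPyramid n → Spec_RightConPyramid n (RightConPyramid n)

-- ===== LEMMAS AND PROOFS =====

-- the descending half of A is the reverse of B's mirrored prefix
lemma desc_half (n : Int) :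
    (PySem.List.pyRange (n+1) (2*n) 1).map (fun i => starLine (2*n - i))
      = ((PySem.List.pyRange 1 n 1).map starLine).reverse := by
  rw [← List.map_reverse]
  have hrev : (PySem.List.pyRange 1 n 1).reverse = PySem.List.pyRange (n-1) 0 (-1) := by
    have h := PySem.List.pyRange_neg_one_eq_reverse (n-1) 0
    norm_num at h
    rw [h]
  rw [hrev, PySem.List.pyRange_one, PySem.List.pyRange_neg_one, List.map_map, List.map_map]
  have h : (2*n - (n+1)).toNat = (n - 1 - 0).toNat := by omega
  rw [h]
  apply List.map_congr_left
  intro k _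
  simp only [Function.comp]
  congr 1
  omega

theorem RightConPyramid_spec : Claim_equal_RightConPyramid := by
  intro n _
  unfold Spec_RightConPyramid RightConPyramid RightConPyramid_alt
  rw [PySem.List.foldl_append_singleton_eq_map, List.nil_append]
  by_cases hn : n ≤ 0
  · rw [PySem.List.pyRange_one_eq_nil (by omega), PySem.List.pyRange_one_eq_nil (by omega)]
    simp [PySem.List.slice]
  · push Not at hn
    rw [PySem.List.pyRange_one_append 1 (n+1) (2*n) (by omega) (by omega), List.map_append]
    have h1 : (PySem.List.pyRange 1 (n+1) 1).map
        (fun i => if i ≤ n then starLine i else starLine (2*n - i))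
        = (PySem.List.pyRange 1 (n+1) 1).map starLine := by
      apply List.map_congr_left
      intro i hi
      rw [PySem.List.mem_pyRange_one] at hi
      simp [show i ≤ n by omega]
    have h2 : (PySem.List.pyRange (n+1) (2*n) 1).map
        (fun i => if i ≤ n then starLine i else starLine (2*n - i))
        = (PySem.List.pyRange (n+1) (2*n) 1).map (fun i => starLine (2*n - i)) := by
      apply List.map_congr_left
      intro i hi
      rw [PySem.List.mem_pyRange_one] at hi
      simp [show ¬ i ≤ n by omega]
    rw [h1, h2, desc_half]
    congr 1
    have hsplit : PySem.List.pyRange 1 (n+1) 1 = PySem.List.pyRange 1 n 1 ++ [n] :=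
      PySem.List.pyRange_one_succ_right (a := 1) (by omega)
    rw [hsplit, List.map_append]
    rw [PySem.List.slice_to_neg_one]
    simp
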